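-- pv_equiv track=rewrite | github.com/xuda1979/texas_holdem_ai_gatc | texas_holdem.py | get_hand_combinations
-- ===== SOURCE A (Python) =====
-- def get_hand_combinations(cards):
--     """Generate all possible 5-card combinations from the given cards."""
--     if len(cards) < 5:
--         return []
--     combinations = []
--     for i in range(len(cards)):
--         for j in range(i + 1, len(cards)):
--             for k in range(j + 1, len(cards)):
--                 for l in range(k + 1, len(cards)):
--                     for m in range(l + 1, len(cards)):
--                         combinations.append([cards[i], cards[j], cards[k], cards[l], cards[m]])
--     return combinations
-- ===== SOURCE B (Python) =====
-- def get_hand_combinations(cards):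
--     """Generate all possible 5-card combinations from the given cards."""
--     if len(cards) < 5:
--         return []
--     return _combs(5, cards)
--
--
-- def _combs(k, cs):
--     if k == 0:
--         return [[]]
--     if not cs:
--         return []
--     head, tail = cs[0], cs[1:]
--     return [[head] + rest for rest in _combs(k - 1, tail)] + _combs(k, tail)
-- ===== Notes on version B (the rewrite author's own statement) =====
-- stated objective: alternative
-- what changed: Replaced A's five fixed nested index loops with a single recursion on the remaining choice count over the list structure (head-included branch plus head-skipped branch), producing the same lexicographic order.
import Mathlib
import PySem

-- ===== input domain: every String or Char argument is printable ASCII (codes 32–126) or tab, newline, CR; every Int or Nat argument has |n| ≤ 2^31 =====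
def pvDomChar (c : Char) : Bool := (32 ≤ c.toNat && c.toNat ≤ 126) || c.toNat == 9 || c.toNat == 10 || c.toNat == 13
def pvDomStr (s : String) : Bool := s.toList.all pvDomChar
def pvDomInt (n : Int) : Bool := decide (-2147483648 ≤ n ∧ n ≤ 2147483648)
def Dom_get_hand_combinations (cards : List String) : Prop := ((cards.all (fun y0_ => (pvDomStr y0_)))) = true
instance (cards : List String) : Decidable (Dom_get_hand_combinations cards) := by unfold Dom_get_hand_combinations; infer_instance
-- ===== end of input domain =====

-- B replaces A's five fixed nested index loops by a single recursion on the choice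
-- count over the list structure (objective: alternative decomposition, same output order).

-- ===== PORT A =====
-- cards[i] is ported as pyGetD with default "": every index visited by the loops is in range,
-- so this is exact (Python never raises here).
def get_hand_combinations (cards : List String) : List (List String) :=
  if cards.length < 5 then []
  else
    (PySem.List.pyRange 0 (cards.length : Int) 1).foldl (fun acc1 i =>
      (PySem.List.pyRange (i + 1) (cards.length : Int) 1).foldl (fun acc2 j =>
        (PySem.List.pyRange (j + 1) (cards.length : Int) 1).foldl (fun acc3 k =>
          (PySem.List.pyRange (k + 1) (cards.length : Int) 1).foldl (fun acc4 l =>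
            (PySem.List.pyRange (l + 1) (cards.length : Int) 1).foldl (fun acc5 m =>
              acc5 ++ [[PySem.List.pyGetD cards i "", PySem.List.pyGetD cards j "",
                        PySem.List.pyGetD cards k "", PySem.List.pyGetD cards l "",
                        PySem.List.pyGetD cards m ""]]) acc4) acc3) acc2) acc1) []

-- ===== PORT B =====
-- port of Source B's helper _combs(k, cs)
def pvCombs : Nat → List String → List (List String)
  | 0, _ => [[]]
  | _ + 1, [] => []
  | k + 1, c :: cs => (pvCombs k cs).map (fun rest => c :: rest) ++ pvCombs (k + 1) cs

def get_hand_combinations_alt (cards : List String) : List (List String) :=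
  if cards.length < 5 then [] else pvCombs 5 cards

-- ===== PRECONDITION & SPEC =====
def Spec_get_hand_combinations (cards : List String) (out : List (List String)) : Prop := out = get_hand_combinations_alt cards
instance (cards : List String) (out : List (List String)) : Decidable (Spec_get_hand_combinations cards out) := by unfold Spec_get_hand_combinations; infer_instance

-- ===== CLAIM (what is proved, stated in full; the proofs are below) =====
def Claim_equal_get_hand_combinations : Prop := ∀ (cards : List String), Dom_get_hand_combinations cards → Spec_get_hand_combinations cards (get_hand_combinations cards)

-- ===== LEMMAS AND PROOFS =====

-- proof-only helper: the k-deep nested loop of A starting at index s, in flatMap form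
def pvNest (cards : List String) : Nat → Int → List (List String)
  | 0, _ => [[]]
  | k + 1, s =>
    (PySem.List.pyRange s (cards.length : Int) 1).flatMap
      (fun i => (pvNest cards k (i + 1)).map (fun r => PySem.List.pyGetD cards i "" :: r))

lemma pvNest_eq_combs (cards : List String) :
    ∀ (k s : Nat), pvNest cards k (s : Int) = pvCombs k (cards.drop s) := by
  intro k
  induction k with
  | zero => intro s; simp [pvNest, pvCombs]
  | succ k ih =>
    intro s
    generalize hgen : cards.length - s = t
    induction t generalizing s with
    | zero =>
      have hle : ((cards.length : Int)) ≤ (s : Int) := by exact_mod_cast (by omega : cards.length ≤ s)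
      rw [List.drop_eq_nil_of_le (by omega)]
      show (PySem.List.pyRange (s : Int) (cards.length : Int) 1).flatMap _ = _
      rw [PySem.List.pyRange_one_eq_nil hle]
      simp [pvCombs]
    | succ t iht =>
      have hlt : s < cards.length := by omega
      have hcons : cards.drop s = cards[s] :: cards.drop (s + 1) :=
        (List.getElem_cons_drop hlt).symm
      rw [hcons]
      show (PySem.List.pyRange (s : Int) (cards.length : Int) 1).flatMap _ = _
      rw [PySem.List.pyRange_one_cons (by exact_mod_cast hlt), List.flatMap_cons]
      have h1 : ((s : Int) + 1) = ((s + 1 : Nat) : Int) := by push_cast; ring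
      have h2 : (PySem.List.pyRange ((s : Int) + 1) (cards.length : Int) 1).flatMap
          (fun i => (pvNest cards k (i + 1)).map (fun r => PySem.List.pyGetD cards i "" :: r))
          = pvNest cards (k + 1) ((s + 1 : Nat) : Int) := by
        rw [h1]; rfl
      rw [h2, iht (s + 1) (by omega)]
      have h3 : pvNest cards k ((s : Int) + 1) = pvCombs k (cards.drop (s + 1)) := by
        rw [h1]; exact ih (s + 1)
      have h4 : PySem.List.pyGetD cards (s : Int) "" = cards[s] := by
        simp [PySem.List.pyGetD_natCast, List.getElem?_eq_getElem hlt]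
      rw [h3, h4]
      rfl

lemma pvA_flat (cards : List String) (h : ¬ cards.length < 5) :
    get_hand_combinations cards = pvNest cards 5 0 := by
  rw [get_hand_combinations, if_neg h]
  simp only [PySem.List.foldl_append_eq_flatMap]
  simp [pvNest, List.map_flatMap]

-- ===== VERDICT (by name: the statement is the Claim_ definition above) =====
theorem get_hand_combinations_spec : Claim_equal_get_hand_combinations := by
  intro cards _
  unfold Spec_get_hand_combinations get_hand_combinations_alt
  by_cases h : cards.length < 5
  · simp [get_hand_combinations, h]
  · rw [if_neg h, pvA_flat cards h]
    have := pvNest_eq_combs cards 5 0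
    simpa using this
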